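-- pv_equiv track=rewrite | github.com/tlundin/chess_ai | pgn_generator.py | _board_to_pgn
-- ===== SOURCE A (Python) =====
-- from typing import List, Dict, Tuple
--
-- def _board_to_pgn(board: List[List[str]]) -> str:
--     """Convert board array to PGN format."""
--     pgn_ranks = []
--
--     for rank in board:
--         pgn_rank = ""
--         empty_count = 0
--
--         for piece in rank:
--             if piece == ' ':
--                 empty_count += 1
--             else:
--                 if empty_count > 0:
--                     pgn_rank += str(empty_count)
--                     empty_count = 0
--                 pgn_rank += piece
--
--         if empty_count > 0:
--             pgn_rank += str(empty_count)
--
--         pgn_ranks.append(pgn_rank)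
--
--     return '/'.join(pgn_ranks)
-- ===== SOURCE B (Python) =====
-- def _board_to_pgn(board):
--     """Convert board array to PGN format.
--
--     Two-pointer run-length scan per rank: each maximal run of equal cells is
--     emitted at once (its length for runs of ' ', the pieces themselves
--     otherwise), instead of A's per-cell accumulator-and-flush loop.
--     """
--     def rank_str(rank):
--         parts = []
--         i, n = 0, len(rank)
--         while i < n:
--             j = i
--             while j < n and rank[j] == rank[i]:
--                 j += 1
--             parts.append(str(j - i) if rank[i] == ' ' else ''.join(rank[i:j]))
--             i = j
--         return ''.join(parts)
--     return '/'.join(rank_str(rank) for rank in board)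
-- ===== Notes on version B (the rewrite author's own statement) =====
-- stated objective: alternative
-- what changed: Replaces A's per-cell loop with an empty-square counter and flush logic by a two-pointer scan that extracts each maximal run of equal cells and emits it in one step (run length for spaces, the joined pieces otherwise).
import Mathlib
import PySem

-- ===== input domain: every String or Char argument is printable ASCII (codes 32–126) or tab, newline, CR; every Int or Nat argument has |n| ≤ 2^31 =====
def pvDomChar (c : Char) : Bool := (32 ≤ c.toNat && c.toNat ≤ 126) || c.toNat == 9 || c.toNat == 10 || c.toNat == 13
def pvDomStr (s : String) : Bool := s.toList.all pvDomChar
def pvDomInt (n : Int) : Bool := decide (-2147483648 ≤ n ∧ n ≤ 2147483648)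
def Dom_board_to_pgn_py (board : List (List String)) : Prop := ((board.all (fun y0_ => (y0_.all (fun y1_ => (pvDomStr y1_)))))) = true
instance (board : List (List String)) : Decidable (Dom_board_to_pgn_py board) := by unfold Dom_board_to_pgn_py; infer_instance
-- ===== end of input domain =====

-- B replaces A's per-cell empty-counter/flush loop by a two-pointer maximal-run scan per rank; same result, similar cost (objective: alternative).


-- ===== PORT A =====
def board_to_pgn_py (board : List (List String)) : String :=
  let pgn_ranks := board.foldl (fun acc rank =>
    let st := rank.foldl (fun (st : String × Int) piece =>
      if piece == " " then (st.1, st.2 + 1)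
      else ((if st.2 > 0 then st.1 ++ PySem.Int.toStr st.2 else st.1) ++ piece, 0)) ("", (0 : Int))
    acc ++ [if st.2 > 0 then st.1 ++ PySem.Int.toStr st.2 else st.1]) []
  PySem.Str.join "/" pgn_ranks

-- ===== PORT B =====
-- two-pointer run scan: each step takes the maximal run of cells equal to the first one
def pvRuns : List String → List String
  | [] => []
  | x :: xs =>
    (if x == " " then PySem.Int.toStr (((x :: xs.takeWhile (· == x)).length : Nat) : Int)
     else PySem.Str.join "" (x :: xs.takeWhile (· == x)))
      :: pvRuns (xs.dropWhile (· == x))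
termination_by l => l.length
decreasing_by simpa using Nat.lt_succ_of_le (List.length_dropWhile_le _ _)

def board_to_pgn_py_alt (board : List (List String)) : String :=
  PySem.Str.join "/" (board.map (fun rank => PySem.Str.join "" (pvRuns rank)))

-- ===== PRECONDITION & SPEC =====
def Spec_board_to_pgn_py (board : List (List String)) (out : String) : Prop := out = board_to_pgn_py_alt board
instance (board : List (List String)) (out : String) : Decidable (Spec_board_to_pgn_py board out) := by unfold Spec_board_to_pgn_py; infer_instance

-- ===== CLAIM (what is proved, stated in full; the proofs are below) =====
def Claim_equal_board_to_pgn_py : Prop := ∀ (board : List (List String)), Dom_board_to_pgn_py board → Spec_board_to_pgn_py board (board_to_pgn_py board)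

-- ===== LEMMAS AND PROOFS =====

-- simple recursive characterisation of A's per-rank accumulator loop (c = pending count of ' ' cells)
def encS : List String → Nat → String
  | [], c => if 0 < c then PySem.Int.toStr (c : Int) else ""
  | x :: xs, c =>
    if x == " " then encS xs (c + 1)
    else (if 0 < c then PySem.Int.toStr (c : Int) else "") ++ x ++ encS xs 0

theorem join_empty_nil : PySem.Str.join "" [] = "" := rfl

theorem join_empty_cons (a : String) (l : List String) :
    PySem.Str.join "" (a :: l) = a ++ PySem.Str.join "" l := by
  cases l <;> simp [PySem.Str.join, PySem.Chars.join, List.intercalate, String.ofList_append, String.ofList_toList]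

theorem rankA_eq_encS (l : List String) (s : String) (c : Nat) :
    (let st := l.foldl (fun (st : String × Int) piece =>
        if piece == " " then (st.1, st.2 + 1)
        else ((if st.2 > 0 then st.1 ++ PySem.Int.toStr st.2 else st.1) ++ piece, 0)) (s, (c : Int))
     if st.2 > 0 then st.1 ++ PySem.Int.toStr st.2 else st.1) = s ++ encS l c := by
  induction l generalizing s c with
  | nil =>
    by_cases h : 0 < c <;> simp [encS, h, Int.natCast_pos]
  | cons x xs ih =>
    simp only [List.foldl_cons]
    by_cases hx : (x == " ") = true
    · rw [if_pos hx]
      have hc : (c : Int) + 1 = ((c + 1 : Nat) : Int) := by push_cast; ring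
      rw [hc, ih s (c + 1)]
      simp [encS, hx]
    · rw [if_neg hx]
      have ih0 := ih ((if (c : Int) > 0 then s ++ PySem.Int.toStr (c : Int) else s) ++ x) 0
      rw [Nat.cast_zero] at ih0
      rw [ih0]
      by_cases h : 0 < c
      · simp [encS, hx, h, Int.natCast_pos, String.append_assoc]
      · simp [encS, hx, h, Int.natCast_pos, String.append_assoc]

theorem encS_nonspace_run (t rest : List String) (ht : ∀ y ∈ t, (y == " ") = false) :
    encS (t ++ rest) 0 = PySem.Str.join "" t ++ encS rest 0 := by
  induction t with
  | nil => simp [join_empty_nil]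
  | cons y t ih =>
    have hy := ht y (List.mem_cons_self ..)
    simp [encS, hy, join_empty_cons, ih (fun z hz => ht z (List.mem_cons_of_mem _ hz)), String.append_assoc]

theorem encS_space_run (t : List String) (c : Nat) (rest : List String)
    (ht : ∀ y ∈ t, y = " ") (hr : ∀ y, rest.head? = some y → (y == " ") = false) (hc : 0 < c) :
    encS (t ++ rest) c = PySem.Int.toStr ((c + t.length : Nat) : Int) ++ encS rest 0 := by
  induction t generalizing c with
  | nil =>
    cases rest with
    | nil => simp [encS, hc]
    | cons y ys =>
      have hy := hr y rfl
      simp [encS, hc, hy, String.append_assoc]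
  | cons z t ih =>
    have hz : z = " " := ht z (List.mem_cons_self ..)
    have step : encS ((z :: t) ++ rest) c = encS (t ++ rest) (c + 1) := by
      simp [encS, hz]
    rw [step, ih (c + 1) (fun y hy => ht y (List.mem_cons_of_mem _ hy)) (Nat.succ_pos c)]
    have harg : (c + 1) + t.length = c + (z :: t).length := by
      simp only [List.length_cons]; omega
    rw [harg]

theorem runs_join_eq_encS (l : List String) : PySem.Str.join "" (pvRuns l) = encS l 0 := by
  induction l using pvRuns.induct with
  | case1 => simp [pvRuns, join_empty_nil, encS]
  | case2 x xs ih =>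
    have hsplit : xs.takeWhile (· == x) ++ xs.dropWhile (· == x) = xs := List.takeWhile_append_dropWhile
    have hr : ∀ y, (xs.dropWhile (· == x)).head? = some y → (y == x) = false := by
      intro y hy
      have := List.head?_dropWhile_not (p := (· == x)) (l := xs)
      rw [hy] at this
      simpa using this
    by_cases hx : (x == " ") = true
    · have hxe : x = " " := by simpa using hx
      have htw : ∀ y ∈ xs.takeWhile (· == x), y = " " := by
        intro y hy
        have h := List.mem_takeWhile_imp hy
        simp at h
        rw [h, hxe]
      have hr' : ∀ y, (xs.dropWhile (· == x)).head? = some y → (y == " ") = false := by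
        intro y hy
        have h := hr y hy
        rw [hxe] at h
        exact h
      rw [pvRuns, if_pos hx, join_empty_cons, ih]
      conv_rhs => rw [← hsplit]
      have e1 : encS (x :: (xs.takeWhile (· == x) ++ xs.dropWhile (· == x))) 0
          = encS (xs.takeWhile (· == x) ++ xs.dropWhile (· == x)) 1 := by
        simp [encS, hx]
      rw [e1, encS_space_run _ 1 _ htw hr' Nat.one_pos]
      have hlen : (x :: xs.takeWhile (· == x)).length = 1 + (xs.takeWhile (· == x)).length := by
        simp [Nat.add_comm]
      rw [hlen]
    · have hxf : (x == " ") = false := by cases h : (x == " ") <;> simp_all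
      have htw : ∀ y ∈ x :: xs.takeWhile (· == x), (y == " ") = false := by
        intro y hy
        rcases List.mem_cons.mp hy with h | h
        · rw [h]; exact hxf
        · have h2 := List.mem_takeWhile_imp h
          simp at h2
          rw [h2]; exact hxf
      rw [pvRuns, if_neg hx, join_empty_cons, ih]
      have e1 : encS (x :: xs) 0
          = encS ((x :: xs.takeWhile (· == x)) ++ xs.dropWhile (· == x)) 0 := by
        rw [List.cons_append, hsplit]
      rw [e1, encS_nonspace_run _ _ htw]

theorem rank_eq (rank : List String) :
    (let st := rank.foldl (fun (st : String × Int) piece =>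
        if piece == " " then (st.1, st.2 + 1)
        else ((if st.2 > 0 then st.1 ++ PySem.Int.toStr st.2 else st.1) ++ piece, 0)) ("", (0 : Int))
     if st.2 > 0 then st.1 ++ PySem.Int.toStr st.2 else st.1) = PySem.Str.join "" (pvRuns rank) := by
  have := rankA_eq_encS rank "" 0
  simp only [Nat.cast_zero] at this
  rw [this, runs_join_eq_encS]
  simp

-- ===== VERDICT (by name: the statement is the Claim_ definition above) =====
theorem board_to_pgn_py_spec : Claim_equal_board_to_pgn_py := by
  intro board _
  unfold Spec_board_to_pgn_py board_to_pgn_py board_to_pgn_py_alt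
  rw [PySem.List.foldl_append_singleton_eq_map]
  simp only [List.nil_append]
  congr 1
  exact List.map_congr_left (fun rank _ => rank_eq rank)
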